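-- pv_equiv track=rewrite | github.com/mehmetnuribasa/sliding-puzzle-game | solver.py | get_goal_state
-- ===== SOURCE A (Python) =====
-- def get_goal_state(size):
--     """
--     Generate the goal (solved) state for a given grid size.
--
--     Tiles numbered 1..(size*size-1), blank (0) in the bottom-right corner.
--     """
--     goal = []
--     num = 1
--     for r in range(size):
--         row = []
--         for c in range(size):
--             if r == size - 1 and c == size - 1:
--                 row.append(0)
--             else:
--                 row.append(num)
--                 num += 1
--         goal.append(row)
--     return goal
-- ===== SOURCE B (Python) =====
-- def get_goal_state(size):
--     """
--     Generate the goal (solved) state for a given grid size.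
--
--     Build the flat solved sequence 1..n*n-1 followed by the blank 0
--     (n = size clamped to 0 for non-positive sizes, giving an empty grid),
--     then reshape it into rows by slicing.
--     """
--     n = max(size, 0)
--     flat = list(range(1, n * n)) + [0]
--     return [flat[r * n:(r + 1) * n] for r in range(n)]
-- ===== Notes on version B (the rewrite author's own statement) =====
-- stated objective: alternative
-- what changed: B first builds the flat solved sequence 1..size*size-1 followed by the blank 0 as one list, then reshapes it into rows by slicing, instead of A's nested loops with a running counter and a per-cell last-cell conditional.
import Mathlib
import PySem

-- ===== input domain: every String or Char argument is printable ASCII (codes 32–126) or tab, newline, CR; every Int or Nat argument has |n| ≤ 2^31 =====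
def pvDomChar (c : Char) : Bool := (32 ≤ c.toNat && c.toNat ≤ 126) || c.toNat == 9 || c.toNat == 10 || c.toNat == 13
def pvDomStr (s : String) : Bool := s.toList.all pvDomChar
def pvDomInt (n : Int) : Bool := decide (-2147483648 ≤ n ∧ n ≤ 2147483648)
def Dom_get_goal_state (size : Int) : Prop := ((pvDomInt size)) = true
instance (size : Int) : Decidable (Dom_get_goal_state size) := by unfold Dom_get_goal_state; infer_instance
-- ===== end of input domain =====

-- B builds the flat solved sequence 1..size*size-1 followed by 0 and reshapes it into rows by slicing, instead of A's per-cell running counter: simpler staged decomposition, same cost.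

-- ===== PORT A =====
def get_goal_state (size : Int) : List (List Int) :=
  let res := (PySem.List.pyRange 0 size 1).foldl
    (fun (st : List (List Int) × Int) r =>
      let inner := (PySem.List.pyRange 0 size 1).foldl
        (fun (st2 : List Int × Int) c =>
          if r = size - 1 ∧ c = size - 1 then (st2.1 ++ [0], st2.2)
          else (st2.1 ++ [st2.2], st2.2 + 1))
        ([], st.2)
      (st.1 ++ [inner.1], inner.2))
    ([], 1)
  res.1

-- ===== PORT B =====
def get_goal_state_alt (size : Int) : List (List Int) :=
  let n := max size 0
  let flat := PySem.List.pyRange 1 (n * n) 1 ++ [0]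
  (PySem.List.pyRange 0 n 1).map
    (fun r => PySem.List.slice flat (some (r * n)) (some ((r + 1) * n)))

-- ===== PRECONDITION & SPEC =====
def Spec_get_goal_state (size : Int) (out : List (List Int)) : Prop := out = get_goal_state_alt size
instance (size : Int) (out : List (List Int)) : Decidable (Spec_get_goal_state size out) := by unfold Spec_get_goal_state; infer_instance

-- ===== CLAIM (what is proved, stated in full; the proofs are below) =====
def Claim_equal_get_goal_state : Prop := ∀ (size : Int), Dom_get_goal_state size → Spec_get_goal_state size (get_goal_state size)

-- ===== LEMMAS AND PROOFS =====

-- closed form of one outer-loop step of A for size = m + 1 (rows other than the last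
-- append the next (m+1) counter values; the last row appends m values and the blank)
def pvG (m : Nat) (st : List (List Int) × Int) (r : Int) : List (List Int) × Int :=
  if r = (m : Int) then
    (st.1 ++ [(List.range m).map (fun (k : Nat) => st.2 + (k : Int)) ++ [0]], st.2 + (m : Int))
  else
    (st.1 ++ [(List.range (m + 1)).map (fun (k : Nat) => st.2 + (k : Int))], st.2 + ((m : Int) + 1))

-- inner loop of A, when the blank condition never fires on the traversed cells
theorem pv_inner_false (size r : Int) (L : List Int)
    (h : ∀ c ∈ L, ¬(r = size - 1 ∧ c = size - 1)) (acc : List Int) (num : Int) :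
    L.foldl (fun (st2 : List Int × Int) c =>
        if r = size - 1 ∧ c = size - 1 then (st2.1 ++ [0], st2.2)
        else (st2.1 ++ [st2.2], st2.2 + 1)) (acc, num)
      = (acc ++ (List.range L.length).map (fun (k : Nat) => num + (k : Int)), num + L.length) := by
  induction L generalizing acc num with
  | nil => simp
  | cons x xs ih =>
    have hx := h x (by simp)
    simp only [List.foldl_cons, if_neg hx]
    rw [ih (fun c hc => h c (by simp [hc]))]
    simp only [List.length_cons]
    refine Prod.ext ?_ (by push_cast; ring)
    show (acc ++ [num]) ++ _ = acc ++ _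
    rw [List.range_succ_eq_map]
    simp only [List.map_cons, List.map_map, List.append_assoc, List.singleton_append,
      Nat.cast_zero, add_zero]
    congr 2
    · simp
      intro a _
      ring

-- one outer step of A equals its closed form pvG on every row index of the grid
theorem pv_step_eq (m : Nat) : ∀ (st : List (List Int) × Int),
    ∀ r ∈ PySem.List.pyRange 0 ((m : Nat) + 1 : Int) 1,
    (fun (st : List (List Int) × Int) r =>
      let inner := (PySem.List.pyRange 0 ((m : Nat) + 1 : Int) 1).foldl
        (fun (st2 : List Int × Int) c =>
          if r = ((m : Nat) + 1 : Int) - 1 ∧ c = ((m : Nat) + 1 : Int) - 1 then (st2.1 ++ [0], st2.2)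
          else (st2.1 ++ [st2.2], st2.2 + 1))
        ([], st.2)
      (st.1 ++ [inner.1], inner.2)) st r = pvG m st r := by
  intro st r hr
  rw [PySem.List.mem_pyRange_one] at hr
  by_cases hrm : r = (m : Int)
  · subst hrm
    simp only [pvG]
    rw [show ((m : Nat) + 1 : Int) = ((m : Int)) + 1 by norm_num,
      PySem.List.pyRange_one_succ_right (by positivity), List.foldl_append,
      pv_inner_false ((m : Int) + 1) (m : Int) _
        (by
          intro c hc h
          rw [PySem.List.mem_pyRange_one] at hc
          omega) [] st.2]
    simp
  · simp only [pvG, if_neg hrm]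
    rw [pv_inner_false ((m : Nat) + 1 : Int) r _
      (by
        intro c hc h
        omega) [] st.2]
    simp [show (((m : Nat) : Int) + 1).toNat = m + 1 by omega]

-- the outer loop of A (in closed form) over the first j rows, j ≤ m
theorem pv_outerg (m j : Nat) (hj : j ≤ m) :
    (PySem.List.pyRange 0 (j : Int) 1).foldl (pvG m) ([], 1)
      = ((List.range j).map (fun (r : Nat) =>
           (List.range (m + 1)).map (fun (c : Nat) => (r : Int) * ((m : Int) + 1) + (c : Int) + 1)),
         1 + (j : Int) * ((m : Int) + 1)) := by
  induction j with
  | zero => simp [PySem.List.pyRange_one_eq_nil (by omega : (0:Int) ≤ 0)]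
  | succ j ih =>
    rw [show ((j + 1 : Nat) : Int) = (j : Int) + 1 by push_cast; ring,
      PySem.List.pyRange_one_succ_right (by positivity), List.foldl_append,
      ih (by omega)]
    simp only [List.foldl_cons, List.foldl_nil, pvG,
      if_neg (by omega : ¬((j : Int) = (m : Int)))]
    rw [show List.range (j + 1) = List.range j ++ [j] from List.range_succ,
      List.map_append, List.map_singleton]
    refine Prod.ext ?_ (by simp only []; ring)
    simp only []
    congr 2
    apply List.map_congr_left
    intro c _
    ring

-- dropping a elements from a mapped range re-indexes the range
theorem pv_drop_map_range (N a : Nat) (f : Nat → Int) (_h : a ≤ N) :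
    ((List.range N).map f).drop a = (List.range (N - a)).map (fun k => f (a + k)) := by
  apply List.ext_getElem
  · simp
  · intro i h1 h2
    simp at h1 h2 ⊢

-- one full row taken out of the flat sequence (before the blank) by drop/take
theorem pv_row_take (N a n : Nat) (f : Nat → Int) (z : Int) (h : a + n ≤ N) :
    ((((List.range N).map f) ++ [z]).drop a).take n = (List.range n).map (fun c => f (a + c)) := by
  rw [List.drop_append_of_le_length (by simp; omega),
    List.take_append_of_le_length (by simp; omega),
    pv_drop_map_range N a f (by omega)]
  apply List.ext_getElem
  · simp; omega
  · intro i h1 h2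
    simp at h1 h2 ⊢

-- ===== VERDICT (by name: the statement is the Claim_ definition above) =====
set_option maxRecDepth 8192 in
theorem get_goal_state_spec : Claim_equal_get_goal_state := by
  intro size _
  unfold Spec_get_goal_state get_goal_state get_goal_state_alt
  by_cases hpos : 0 < size
  · obtain ⟨m, rfl⟩ : ∃ m : Nat, size = ((m : Nat) + 1 : Int) :=
      ⟨(size - 1).toNat, by omega⟩
    rw [show max (((m : Nat) : Int) + 1) 0 = ((m : Nat) : Int) + 1 from max_eq_left (by positivity)]
    -- A side: replace the outer step by its closed form, then split off the last row
    rw [PySem.List.foldl_congr_mem _ _ (pvG m) _ (pv_step_eq m)]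
    rw [show ((m : Nat) + 1 : Int) = ((m : Int)) + 1 by norm_num,
      PySem.List.pyRange_one_succ_right (by positivity), List.foldl_append,
      pv_outerg m m le_rfl]
    simp only [List.foldl_cons, List.foldl_nil, pvG, ite_true]
    -- B side: the flat list is a mapped range followed by the blank; each row is a drop/take
    have hNN : ((m : Int) + 1) * ((m : Int) + 1) = (((m + 1) * (m + 1) : Nat) : Int) := by
      push_cast; ring
    rw [hNN, PySem.List.pyRange_one,
      show ((((m + 1) * (m + 1) : Nat) : Int) - 1).toNat = (m + 1) * (m + 1) - 1 by omega]
    rw [PySem.List.pyRange_one_succ_right (by positivity : (0:Int) ≤ (m : Int)),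
      show PySem.List.pyRange 0 (m : Int) 1
          = List.map (fun k : Nat => (k : Int)) (List.range m) from
        PySem.List.pyRange_zero_nat m]
    rw [List.map_append, List.map_map, List.map_singleton]
    refine congrArg₂ (· ++ ·) ?_ ?_
    · apply List.map_congr_left
      intro j hj
      rw [List.mem_range] at hj
      simp only [Function.comp_apply]
      rw [show (j : Int) * ((m : Int) + 1) = ((j * (m + 1) : Nat) : Int) by push_cast; ring,
        show ((j : Int) + 1) * ((m : Int) + 1)
            = ((j * (m + 1) : Nat) : Int) + (((m + 1) : Nat) : Int) by push_cast; ring,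
        PySem.List.slice_natCast_add,
        pv_row_take _ _ _ _ _ (by
          have h1 : (j + 1) * (m + 1) ≤ m * (m + 1) := Nat.mul_le_mul_right _ (by omega)
          have h2 : (m + 1) * (m + 1) = m * (m + 1) + (m + 1) := by ring
          have h3 : j * (m + 1) + (m + 1) = (j + 1) * (m + 1) := by ring
          omega)]
      apply List.map_congr_left
      intro c hc
      rw [List.mem_range] at hc
      push_cast
      ring
    · rw [show (m : Int) * ((m : Int) + 1) = ((m * (m + 1) : Nat) : Int) by push_cast; ring,
        show ((m : Int) + 1) * ((m : Int) + 1)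
            = ((m * (m + 1) : Nat) : Int) + (((m + 1) : Nat) : Int) by push_cast; ring,
        PySem.List.slice_natCast_add]
      have h2 : (m + 1) * (m + 1) = m * (m + 1) + (m + 1) := by ring
      rw [List.drop_append_of_le_length (by simp; omega),
        pv_drop_map_range _ _ _ (by omega)]
      rw [List.take_of_length_le (by simp; omega)]
      refine congrArg (fun z => [z]) (congrArg₂ (· ++ ·) ?_ rfl)
      rw [show (m + 1) * (m + 1) - 1 - m * (m + 1) = m by omega]
      apply List.map_congr_left
      intro k hk
      rw [List.mem_range] at hk
      push_cast
      ring
  · -- size ≤ 0: both grids are empty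
    rw [show max size 0 = 0 from max_eq_right (by omega)]
    simp [PySem.List.pyRange_one_eq_nil (by omega : size ≤ 0),
      PySem.List.pyRange_one_eq_nil (le_refl (0:Int))]
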